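-- pv_equiv track=rewrite | github.com/MauroRoth/retos-programacion | python-retos/2_anagrama.py | anagrama1
-- ===== SOURCE A (Python) =====
-- def anagrama1 (palabra1, palabra2):
--     condicion1 = sorted(palabra1) == sorted(palabra2)
--     condicion2 = palabra1 != palabra2
--     condicion3 = True
--     for i in range(len(palabra1)):
--         for j in range(len(palabra2)):
--             condicion3 = condicion3 and not(i==j and palabra1[i]==palabra2[j])
--     return condicion1 and condicion2 and condicion3
-- ===== SOURCE B (Python) =====
-- def anagrama1(palabra1, palabra2):
--     if palabra1 == palabra2:
--         return False
--     if sorted(palabra1) != sorted(palabra2):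
--         return False
--     return all(a != b for a, b in zip(palabra1, palabra2))
-- ===== Notes on version B (the rewrite author's own statement) =====
-- stated objective: faster
-- what changed: B replaces A's quadratic nested i×j scan (which only ever acts when i==j) by a single linear pass over zip(palabra1, palabra2) checking same-position characters, with early exits for equal strings and non-anagrams.
import Mathlib
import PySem

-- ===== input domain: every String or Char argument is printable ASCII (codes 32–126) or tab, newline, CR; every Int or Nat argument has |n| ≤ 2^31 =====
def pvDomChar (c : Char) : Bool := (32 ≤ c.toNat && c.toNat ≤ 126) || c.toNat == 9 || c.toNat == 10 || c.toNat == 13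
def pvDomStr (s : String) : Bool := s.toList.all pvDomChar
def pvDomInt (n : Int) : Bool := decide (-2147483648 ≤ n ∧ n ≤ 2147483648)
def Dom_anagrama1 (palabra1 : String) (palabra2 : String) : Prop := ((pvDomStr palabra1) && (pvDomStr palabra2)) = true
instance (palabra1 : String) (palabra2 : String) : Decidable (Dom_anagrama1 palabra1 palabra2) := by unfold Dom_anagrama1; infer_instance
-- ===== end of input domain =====

-- B replaces A's quadratic i×j scan for a same-position equal character by a single
-- linear pass over zip(palabra1, palabra2) with early exits; objective: faster (asymptotic).

-- ===== PORT A =====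
def anagrama1 (palabra1 : String) (palabra2 : String) : Bool :=
  let condicion1 := PySem.List.sorted palabra1.toList (fun c => c) false
                      == PySem.List.sorted palabra2.toList (fun c => c) false
  let condicion2 := palabra1 != palabra2
  let condicion3 :=
    (PySem.List.pyRange 0 (PySem.Str.len palabra1) 1).foldl (fun c3 i =>
      (PySem.List.pyRange 0 (PySem.Str.len palabra2) 1).foldl (fun c3 j =>
        c3 && !((i == j) && (PySem.List.pyGetD palabra1.toList i ' '
                              == PySem.List.pyGetD palabra2.toList j ' '))) c3) true
  condicion1 && condicion2 && condicion3

-- ===== PORT B =====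
def anagrama1_alt (palabra1 : String) (palabra2 : String) : Bool :=
  if palabra1 == palabra2 then false
  else if PySem.List.sorted palabra1.toList (fun c => c) false
            != PySem.List.sorted palabra2.toList (fun c => c) false then false
  else (palabra1.toList.zip palabra2.toList).all (fun ab => ab.1 != ab.2)

-- ===== PRECONDITION & SPEC =====
def Spec_anagrama1 (palabra1 : String) (palabra2 : String) (out : Bool) : Prop := out = anagrama1_alt palabra1 palabra2
instance (palabra1 : String) (palabra2 : String) (out : Bool) : Decidable (Spec_anagrama1 palabra1 palabra2 out) := by unfold Spec_anagrama1; infer_instance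

-- ===== CLAIM (what is proved, stated in full; the proofs are below) =====
def Claim_equal_anagrama1 : Prop := ∀ (palabra1 : String) (palabra2 : String), Dom_anagrama1 palabra1 palabra2 → Spec_anagrama1 palabra1 palabra2 (anagrama1 palabra1 palabra2)

-- ===== LEMMAS AND PROOFS =====
theorem pv_foldl_and {α : Type} (p : α → Bool) :
    ∀ (l : List α) (c0 : Bool), l.foldl (fun c x => c && p x) c0 = (c0 && l.all p) := by
  intro l
  induction l with
  | nil => simp
  | cons x xs ih => intro c0; simp [List.foldl_cons, ih, Bool.and_assoc]

theorem pv_nested_eq_zip (l1 l2 : List Char) :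
    (PySem.List.pyRange 0 (l1.length : Int) 1).foldl (fun c3 i =>
      (PySem.List.pyRange 0 (l2.length : Int) 1).foldl (fun c3 j =>
        c3 && !((i == j) && (PySem.List.pyGetD l1 i ' ' == PySem.List.pyGetD l2 j ' '))) c3) true
    = (l1.zip l2).all (fun ab => ab.1 != ab.2) := by
  have h1 : ∀ (i : Int) (c0 : Bool),
      (PySem.List.pyRange 0 (l2.length : Int) 1).foldl (fun c3 j =>
        c3 && !((i == j) && (PySem.List.pyGetD l1 i ' ' == PySem.List.pyGetD l2 j ' '))) c0
      = (c0 && (PySem.List.pyRange 0 (l2.length : Int) 1).all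
          (fun j => !((i == j) && (PySem.List.pyGetD l1 i ' ' == PySem.List.pyGetD l2 j ' ')))) := by
    intro i c0; exact pv_foldl_and _ _ c0
  simp only [h1]
  rw [pv_foldl_and (fun i => (PySem.List.pyRange 0 (l2.length : Int) 1).all
      (fun j => !((i == j) && (PySem.List.pyGetD l1 i ' ' == PySem.List.pyGetD l2 j ' '))))]
  rw [Bool.true_and, Bool.eq_iff_iff]
  simp only [List.all_eq_true, PySem.List.mem_pyRange_one, Bool.not_eq_eq_eq_not, Bool.not_true,
    Bool.and_eq_false_iff, beq_eq_false_iff_ne, ne_eq, bne_iff_ne]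
  constructor
  · intro H ab hab
    obtain ⟨k, hk, hget⟩ := List.mem_iff_getElem.1 hab
    have hk1 : k < l1.length := lt_of_lt_of_le hk (by simp [List.length_zip])
    have hk2 : k < l2.length := lt_of_lt_of_le hk (by simp [List.length_zip])
    have := H (k : Int) ⟨by positivity, by exact_mod_cast hk1⟩ (k : Int) ⟨by positivity, by exact_mod_cast hk2⟩
    rcases this with h | h
    · exact absurd rfl h
    · rw [← hget]
      simp only [List.getElem_zip]
      simpa [PySem.List.pyGetD_natCast, List.getD_eq_getElem, hk1, hk2] using h
  · intro H i hi j hj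
    by_cases hij : i = j
    · right
      subst hij
      obtain ⟨k, rfl⟩ := Int.eq_ofNat_of_zero_le hi.1
      have hk1 : k < l1.length := by exact_mod_cast hi.2
      have hk2 : k < l2.length := by exact_mod_cast hj.2
      have hmem : (l1[k], l2[k]) ∈ l1.zip l2 := by
        have : (l1.zip l2)[k]'(by simp [List.length_zip]; omega) = (l1[k], l2[k]) := List.getElem_zip
        rw [← this]; exact List.getElem_mem _
      have := H _ hmem
      simpa [PySem.List.pyGetD_natCast, List.getD_eq_getElem, hk1, hk2] using this
    · exact Or.inl hij

-- ===== VERDICT (by name: the statement is the Claim_ definition above) =====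
theorem anagrama1_spec : Claim_equal_anagrama1 := by
  intro p1 p2 _
  unfold Spec_anagrama1 anagrama1 anagrama1_alt
  simp only [PySem.Str.len_eq]
  rw [pv_nested_eq_zip p1.toList p2.toList]
  by_cases h12 : p1 = p2
  · simp [h12]
  · by_cases hs : PySem.List.sorted p1.toList (fun c => c) false
        = PySem.List.sorted p2.toList (fun c => c) false
    · simp [h12, hs]
    · simp [h12, hs]
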